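-- pv_equiv track=rewrite | github.com/scottpeterman/pynetweaver | pynw_cli.py | strip_domain
-- ===== SOURCE A (Python) =====
-- def strip_domain(device_id: str, domain: str) -> str:
--     """Remove domain name from device identifier, considering multiple subdomains."""
--     if not device_id or not domain:
--         return device_id
--
--     # Split domain and device_id into segments
--     domain_parts = domain.split('.')
--     device_parts = device_id.split('.')
--
--     # Find the start index where domain parts match the device parts from the end
--     match_index = next(
--         (i for i in range(len(device_parts) - len(domain_parts), len(device_parts))
--          if device_parts[i:] == domain_parts), None
--     )
--
--     # If a match was found, keep only the hostname part
--     if match_index is not None: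
--         return '.'.join(device_parts[:match_index])
--     return device_id
-- ===== SOURCE B (Python) =====
-- def strip_domain(device_id: str, domain: str) -> str:
--     """Remove domain name from device identifier, considering multiple subdomains."""
--     if not device_id or not domain:
--         return device_id
--     if device_id == domain:
--         return ''
--     if device_id.endswith('.' + domain):
--         return device_id[:-(len(domain) + 1)]
--     return device_id
-- ===== Notes on version B (the rewrite author's own statement) =====
-- stated objective: idiomatic
-- what changed: Replaces A's segment-list split and index-range scan with direct string operations: an equality check, endswith('.' + domain), and a single slice.
import Mathlib
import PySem

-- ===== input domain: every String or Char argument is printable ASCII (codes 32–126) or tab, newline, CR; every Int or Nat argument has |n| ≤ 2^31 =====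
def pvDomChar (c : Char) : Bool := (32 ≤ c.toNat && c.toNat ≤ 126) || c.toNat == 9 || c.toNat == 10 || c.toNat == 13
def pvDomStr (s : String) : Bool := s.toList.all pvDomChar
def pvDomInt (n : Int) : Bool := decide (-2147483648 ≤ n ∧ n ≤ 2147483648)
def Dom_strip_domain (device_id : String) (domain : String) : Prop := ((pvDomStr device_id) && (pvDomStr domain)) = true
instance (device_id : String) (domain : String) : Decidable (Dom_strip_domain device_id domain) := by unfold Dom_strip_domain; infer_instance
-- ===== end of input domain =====

-- B replaces A's segment-list split and index scan by direct string operations (equality / endswith / one slice); objective: idiomatic.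

-- ===== PORT A =====
-- Literal transliteration of A: guard, split both strings on '.', scan the index
-- range with next(...) (ported as find? over PySem.List.pyRange), join the prefix.
def strip_domain (device_id : String) (domain : String) : String :=
  if device_id.toList = [] ∨ domain.toList = [] then device_id
  else
    let domain_parts := PySem.Chars.splitOn domain.toList ['.']
    let device_parts := PySem.Chars.splitOn device_id.toList ['.']
    let match_index : Option Int :=
      (PySem.List.pyRange ((device_parts.length : Int) - (domain_parts.length : Int))
        (device_parts.length : Int)).find?
        (fun i => PySem.List.slice device_parts (some i) none == domain_parts)
    match match_index with
    | some i => String.ofList (PySem.Chars.join ['.'] (PySem.List.slice device_parts none (some i)))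
    | none => device_id

-- ===== PORT B =====
-- Literal transliteration of Source B: guard, equality check, endswith('.'+domain), slice.
def strip_domain_alt (device_id : String) (domain : String) : String :=
  if device_id.toList = [] ∨ domain.toList = [] then device_id
  else if device_id.toList = domain.toList then ""
  else if PySem.Chars.endswith device_id.toList ('.' :: domain.toList) then
    String.ofList (PySem.List.slice device_id.toList none (some (-((domain.toList.length : Int) + 1))))
  else device_id

-- ===== PRECONDITION & SPEC =====
def Spec_strip_domain (device_id : String) (domain : String) (out : String) : Prop := out = strip_domain_alt device_id domain
instance (device_id : String) (domain : String) (out : String) : Decidable (Spec_strip_domain device_id domain out) := by unfold Spec_strip_domain; infer_instance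

-- ===== CLAIM (what is proved, stated in full; the proofs are below) =====
def Claim_equal_strip_domain : Prop := ∀ (device_id : String) (domain : String), Dom_strip_domain device_id domain → Spec_strip_domain device_id domain (strip_domain device_id domain)

-- ===== LEMMAS AND PROOFS =====

-- Simple structural model of s.split('.') (single-character separator).
def pvSplit : List Char → List (List Char)
  | [] => [[]]
  | c :: r => if c = '.' then [] :: pvSplit r else (pvSplit r).modifyHead (c :: ·)

theorem pvSplit_ne_nil (l : List Char) : pvSplit l ≠ [] := by
  induction l with
  | nil => simp [pvSplit]
  | cons c r ih =>
    simp only [pvSplit]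
    split
    · simp
    · cases h : pvSplit r with
      | nil => exact absurd h ih
      | cons a t => simp [List.modifyHead]

theorem pvSplit_go (fuel : Nat) (l cur : List Char) (acc : List (List Char))
    (h : l.length < fuel) :
    PySem.Chars.splitOn.go ['.'] fuel l cur acc
      = acc.reverse ++ (pvSplit l).modifyHead (cur.reverse ++ ·) := by
  induction fuel generalizing l cur acc with
  | zero => omega
  | succ n ih =>
    cases l with
    | nil => simp [PySem.Chars.splitOn.go, pvSplit]
    | cons c rest =>
      by_cases hc : c = '.'
      · subst hc
        rw [show PySem.Chars.splitOn.go ['.'] (n+1) ('.' :: rest) cur acc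
              = PySem.Chars.splitOn.go ['.'] n (List.drop 1 ('.' :: rest)) [] (cur.reverse :: acc) by
            simp [PySem.Chars.splitOn.go, List.isPrefixOf]]
        rw [ih _ _ _ (by simpa using Nat.lt_of_succ_lt_succ h)]
        have hid : List.modifyHead (fun x : List Char => x) (pvSplit rest) = pvSplit rest := by
          cases h' : pvSplit rest <;> simp
        simp [pvSplit, hid]
      · rw [show PySem.Chars.splitOn.go ['.'] (n+1) (c :: rest) cur acc
              = PySem.Chars.splitOn.go ['.'] n rest (c :: cur) acc by
            simp [PySem.Chars.splitOn.go, List.isPrefixOf, Ne.symm hc]]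
        rw [ih _ _ _ (by simpa using Nat.lt_of_succ_lt_succ h)]
        simp only [pvSplit, hc, if_false]
        cases hsr : pvSplit rest with
        | nil => exact absurd hsr (pvSplit_ne_nil rest)
        | cons a t => simp [List.modifyHead]

theorem splitOn_eq_pvSplit (l : List Char) :
    PySem.Chars.splitOn l ['.'] = pvSplit l := by
  have := pvSplit_go (l.length + 1) l [] [] (by omega)
  have hid : List.modifyHead (fun x : List Char => x) (pvSplit l) = pvSplit l := by
    cases h' : pvSplit l <;> simp
  simpa [PySem.Chars.splitOn, hid] using this

theorem join_cons_cons (x y : List Char) (t : List (List Char)) :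
    PySem.Chars.join ['.'] (x :: y :: t) = x ++ '.' :: PySem.Chars.join ['.'] (y :: t) := by
  simp [PySem.Chars.join, List.intercalate, List.intersperse]

theorem join_pvSplit (l : List Char) : PySem.Chars.join ['.'] (pvSplit l) = l := by
  induction l with
  | nil => simp [pvSplit, PySem.Chars.join, List.intercalate]
  | cons c r ih =>
    by_cases hc : c = '.'
    · subst hc
      rw [show pvSplit ('.' :: r) = [] :: pvSplit r from by simp [pvSplit]]
      cases hsr : pvSplit r with
      | nil => exact absurd hsr (pvSplit_ne_nil r)
      | cons a t =>
        rw [join_cons_cons [] a t]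
        rw [hsr] at ih
        simp [ih]
    · rw [show pvSplit (c :: r) = (pvSplit r).modifyHead (c :: ·) from by simp [pvSplit, hc]]
      cases hsr : pvSplit r with
      | nil => exact absurd hsr (pvSplit_ne_nil r)
      | cons a t =>
        rw [hsr] at ih
        cases t with
        | nil =>
          simp only [List.modifyHead]
          simp only [PySem.Chars.join, List.intercalate, List.intersperse, List.flatten] at ih ⊢
          simp at ih
          simp [ih]
        | cons b t' =>
          simp only [List.modifyHead]
          rw [join_cons_cons (c :: a) b t', join_cons_cons a b t'] at *
          rw [List.cons_append]
          exact congrArg (c :: ·) ih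

theorem pvSplit_append (x y : List Char) :
    pvSplit (x ++ '.' :: y) = pvSplit x ++ pvSplit y := by
  induction x with
  | nil => simp [pvSplit]
  | cons c r ih =>
    by_cases hc : c = '.'
    · subst hc; simp [pvSplit, ih]
    · simp only [List.cons_append, pvSplit, hc, if_false, ih]
      cases hsr : pvSplit r with
      | nil => exact absurd hsr (pvSplit_ne_nil r)
      | cons a t => simp [List.modifyHead]

theorem join_append (p q : List (List Char)) (hp : p ≠ []) (hq : q ≠ []) :
    PySem.Chars.join ['.'] (p ++ q)
      = PySem.Chars.join ['.'] p ++ '.' :: PySem.Chars.join ['.'] q := by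
  induction p with
  | nil => exact absurd rfl hp
  | cons a t ih =>
    cases t with
    | nil =>
      cases q with
      | nil => exact absurd rfl hq
      | cons b s => simpa using join_cons_cons a b s
    | cons b s =>
      rw [List.cons_append, join_cons_cons a b s,
        show (b :: s) ++ q = b :: (s ++ q) from rfl]
      have := ih (by simp)
      rw [show ((b :: s) ++ q) = b :: (s ++ q) from rfl] at this
      rw [join_cons_cons a b (s ++ q), this]
      simp

theorem slice_from_drop {α : Type} (xs : List α) (i : Int) :
    PySem.List.slice xs (some i) none = xs.drop (PySem.List.clampIdx xs.length i) := by
  simp only [PySem.List.slice]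
  have h : PySem.List.clampIdx xs.length i ≤ xs.length := by
    simp only [PySem.List.clampIdx]
    split
    · split <;> omega
    · omega
  rw [List.take_of_length_le (by simp)]

theorem slice_to_take {α : Type} (xs : List α) (i : Int) :
    PySem.List.slice xs none (some i) = xs.take (PySem.List.clampIdx xs.length i) := by
  simp [PySem.List.slice]

-- ===== VERDICT (by name: the statement is the Claim_ definition above) =====
theorem strip_domain_spec : Claim_equal_strip_domain := by
  intro dev dom _
  unfold Spec_strip_domain
  by_cases h0 : dev.toList = [] ∨ dom.toList = []
  · unfold strip_domain strip_domain_alt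
    rw [if_pos h0, if_pos h0]
  · have hDpos : 0 < (pvSplit dom.toList).length :=
      List.length_pos_of_ne_nil (pvSplit_ne_nil _)
    have hLpos : 0 < (pvSplit dev.toList).length :=
      List.length_pos_of_ne_nil (pvSplit_ne_nil _)
    simp only [strip_domain, strip_domain_alt, splitOn_eq_pvSplit, if_neg h0]
    by_cases heq : dev.toList = dom.toList
    · rw [heq, if_pos rfl]
      rw [show ((pvSplit dom.toList).length : Int) - ((pvSplit dom.toList).length : Int) = 0 by ring]
      rw [PySem.List.pyRange_one_cons (by exact_mod_cast hDpos)]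
      rw [List.find?_cons_of_pos (by
        rw [PySem.List.slice_from _ (le_refl (0:Int))]
        simp)]
      show String.ofList (PySem.Chars.join ['.'] (PySem.List.slice (pvSplit dom.toList) none (some 0))) = ""
      rw [PySem.List.slice_to _ (le_refl (0:Int))]
      simp [PySem.Chars.join, List.intercalate]
    · rw [if_neg heq]
      by_cases hend : PySem.Chars.endswith dev.toList ('.' :: dom.toList) = true
      · rw [if_pos hend]
        obtain ⟨x, hx⟩ : ∃ t, t ++ ('.' :: dom.toList) = dev.toList :=
          (PySem.Chars.endswith_iff _ _).mp hend
        have hdp : pvSplit dev.toList = pvSplit x ++ pvSplit dom.toList := by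
          rw [← hx]; exact pvSplit_append x dom.toList
        have hLx : (pvSplit dev.toList).length
            = (pvSplit x).length + (pvSplit dom.toList).length := by
          rw [hdp, List.length_append]
        rw [show ((pvSplit dev.toList).length : Int) - ((pvSplit dom.toList).length : Int)
              = ((pvSplit x).length : Int) by rw [hLx]; push_cast; ring]
        rw [PySem.List.pyRange_one_cons (by
          have : (pvSplit x).length < (pvSplit dev.toList).length := by omega
          exact_mod_cast this)]
        rw [List.find?_cons_of_pos (by
          rw [PySem.List.slice_from _ (Int.natCast_nonneg _)]
          rw [Int.toNat_natCast, hdp, List.drop_left]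
          simp)]
        show String.ofList (PySem.Chars.join ['.']
            (PySem.List.slice (pvSplit dev.toList) none (some ((pvSplit x).length : Int)))) = _
        rw [PySem.List.slice_to _ (Int.natCast_nonneg _), Int.toNat_natCast, hdp, List.take_left]
        rw [join_pvSplit]
        have hdlen : dev.toList.length = x.length + 1 + dom.toList.length := by
          rw [← hx]; simp; omega
        rw [slice_to_take]
        have hcl : PySem.List.clampIdx dev.toList.length (-((dom.toList.length : Int) + 1))
            = x.length := by
          simp only [PySem.List.clampIdx, hdlen]
          split_ifs <;> omega
        rw [hcl, ← hx, List.take_left]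
      · rw [if_neg hend]
        rw [List.find?_eq_none.mpr ?_]
        intro i _ hp
        simp only [beq_iff_eq] at hp
        rw [slice_from_drop] at hp
        set a := PySem.List.clampIdx (pvSplit dev.toList).length i with ha
        have haLe : a ≤ (pvSplit dev.toList).length := by
          rw [ha]; simp only [PySem.List.clampIdx]; split_ifs <;> omega
        have hlen : (pvSplit dev.toList).length - a = (pvSplit dom.toList).length := by
          have := congrArg List.length hp
          simpa using this
        have hdecomp : pvSplit dev.toList
            = (pvSplit dev.toList).take a ++ pvSplit dom.toList := by
          rw [← hp, List.take_append_drop]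
        by_cases ha0 : a = 0
        · apply heq
          rw [← join_pvSplit dev.toList, ← join_pvSplit dom.toList, ← hp, ha0]
          simp
        · apply hend
          rw [(PySem.Chars.endswith_iff _ _)]
          have hlt : (List.take a (pvSplit dev.toList)).length = a := by
            simp [List.length_take, Nat.min_eq_left haLe]
          have hpre : List.take a (pvSplit dev.toList) ≠ [] := by
            intro hnil; rw [hnil] at hlt; simp at hlt; exact ha0 hlt.symm
          have hjoin : dev.toList
              = PySem.Chars.join ['.'] (List.take a (pvSplit dev.toList)) ++ '.' :: dom.toList := by
            conv_lhs => rw [← join_pvSplit dev.toList, hdecomp]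
            rw [join_append _ _ hpre (pvSplit_ne_nil _), join_pvSplit]
          exact ⟨_, hjoin.symm⟩
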